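-- pv_equiv track=rewrite | github.com/Zhiyuan2Wang/easy-wordpress-iodlr | generate_cpulist_multi-instance_in_1_socket.py | divide_numbers
-- ===== SOURCE A (Python) =====
-- def divide_numbers(start, end, count):
--     core_num_per_partition = (end - start + 1) // count
--     remainder = (end - start + 1) % count
--
--     parts = []
--     current_num = start
--
--     for i in range(count):
--         part = []
--         for _ in range(core_num_per_partition):
--             part.append(str(current_num))
--             current_num += 1
--
--         if remainder > 0:
--             part.append(str(current_num))
--             current_num += 1
--             remainder -= 1
--
--         parts.append(','.join(part))
--
--     return '|'.join(parts)
-- ===== SOURCE B (Python) =====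
-- def divide_numbers(start, end, count):
--     n = end - start + 1
--     base = max(n // count, 0)
--     rem = n % count
--     sizes = [base + (1 if i < rem else 0) for i in range(count)]
--     total = sum(sizes)
--     nums = [str(start + j) for j in range(total)]
--     groups = []
--     off = 0
--     for size in sizes:
--         groups.append(','.join(nums[off:off + size]))
--         off += size
--     return '|'.join(groups)
-- ===== Notes on version B (the rewrite author's own statement) =====
-- stated objective: alternative
-- what changed: Replaces A's nested loops that thread mutable current_num/remainder state across groups with a precomputed list of group sizes (base + remainder distribution), one flat list of number strings, and an offset/slice pass that joins each slice.
import Mathlib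
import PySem

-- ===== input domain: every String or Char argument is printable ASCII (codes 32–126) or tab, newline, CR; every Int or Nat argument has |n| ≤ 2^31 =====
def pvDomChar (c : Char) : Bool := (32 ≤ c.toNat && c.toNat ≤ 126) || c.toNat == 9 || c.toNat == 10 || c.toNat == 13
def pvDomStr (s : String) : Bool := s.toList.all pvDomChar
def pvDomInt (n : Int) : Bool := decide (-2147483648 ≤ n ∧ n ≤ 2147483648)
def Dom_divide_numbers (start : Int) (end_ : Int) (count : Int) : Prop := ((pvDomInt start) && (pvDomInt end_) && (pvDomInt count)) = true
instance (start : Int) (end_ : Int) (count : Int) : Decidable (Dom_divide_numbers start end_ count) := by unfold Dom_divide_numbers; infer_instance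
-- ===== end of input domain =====

-- B replaces A's nested state-threading loops by precomputed group sizes + one flat
-- list of number strings sliced at running offsets (objective: alternative decomposition).

-- ===== PORT A =====
-- inner 'for _ in range(core_num_per_partition): part.append(str(current_num)); current_num += 1'
def pvAInner (part : List String) (cur : Int) : Nat → List String × Int
  | 0 => (part, cur)
  | k + 1 => pvAInner (part ++ [PySem.Int.toStr cur]) (cur + 1) k

-- outer 'for i in range(count)' loop, threading (parts, current_num, remainder)
def pvAOuter (core : Nat) (parts : List String) (cur : Int) (rem : Int) : Nat → List String
  | 0 => parts
  | k + 1 =>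
    let pc := pvAInner [] cur core
    if rem > 0 then
      pvAOuter core (parts ++ [PySem.Str.join "," (pc.1 ++ [PySem.Int.toStr pc.2])]) (pc.2 + 1) (rem - 1) k
    else
      pvAOuter core (parts ++ [PySem.Str.join "," pc.1]) pc.2 rem k

def divide_numbers (start : Int) (end_ : Int) (count : Int) : String :=
  let core := PySem.Int.floordiv (end_ - start + 1) count
  let rem := PySem.Int.mod (end_ - start + 1) count
  PySem.Str.join "|" (pvAOuter core.toNat [] start rem count.toNat)

-- ===== PORT B =====
def divide_numbers_alt (start : Int) (end_ : Int) (count : Int) : String :=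
  let n := end_ - start + 1
  let base := max (PySem.Int.floordiv n count) 0
  let rem := PySem.Int.mod n count
  let sizes := (PySem.List.pyRange 0 count 1).map (fun i => base + if i < rem then 1 else 0)
  let total := sizes.sum
  let nums := (PySem.List.pyRange 0 total 1).map (fun j => PySem.Int.toStr (start + j))
  let gp := sizes.foldl (fun (acc : List String × Int) size =>
      (acc.1 ++ [PySem.Str.join "," (PySem.List.slice nums (some acc.2) (some (acc.2 + size)))],
       acc.2 + size)) ([], 0)
  PySem.Str.join "|" gp.1

-- ===== PRECONDITION & SPEC =====
-- Pre_ excludes exactly count = 0, where A raises ZeroDivisionError (so does B).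
def Pre_divide_numbers (start : Int) (end_ : Int) (count : Int) : Prop := count ≠ 0
instance (start : Int) (end_ : Int) (count : Int) : Decidable (Pre_divide_numbers start end_ count) := by unfold Pre_divide_numbers; infer_instance

def pvWitness_divide_numbers : Int × Int × Int := (0, 7, 3)

def Spec_divide_numbers (start : Int) (end_ : Int) (count : Int) (out : String) : Prop := out = divide_numbers_alt start end_ count
instance (start : Int) (end_ : Int) (count : Int) (out : String) : Decidable (Spec_divide_numbers start end_ count out) := by unfold Spec_divide_numbers; infer_instance

-- ===== CLAIM (what is proved, stated in full; the proofs are below) =====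
def Claim_equal_divide_numbers : Prop := ∀ (start : Int) (end_ : Int) (count : Int), Dom_divide_numbers start end_ count → Pre_divide_numbers start end_ count → Spec_divide_numbers start end_ count (divide_numbers start end_ count)

-- ===== LEMMAS AND PROOFS =====

-- one group string: the s consecutive numbers starting at cur, comma-joined
def pvGrp (cur : Int) (s : Nat) : String :=
  PySem.Str.join "," ((List.range s).map (fun (j : Nat) => PySem.Int.toStr (cur + (j : Int))))

-- common model of the list of group strings (k groups, current number cur, remainder rem)
def pvModel (core : Nat) : Nat → Int → Int → List String
  | 0, _, _ => []
  | k + 1, cur, rem =>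
    if 0 < rem then
      pvGrp cur (core + 1) :: pvModel core k (cur + (core : Int) + 1) (rem - 1)
    else
      pvGrp cur core :: pvModel core k (cur + (core : Int)) rem

theorem pvAInner_eq (m : Nat) : ∀ (part : List String) (cur : Int),
    pvAInner part cur m =
      (part ++ (List.range m).map (fun (j : Nat) => PySem.Int.toStr (cur + (j : Int))), cur + (m : Int)) := by
  induction m with
  | zero => intro part cur; simp [pvAInner]
  | succ k ih =>
    intro part cur
    rw [pvAInner, ih, Prod.mk.injEq]
    refine ⟨?_, by push_cast; ring⟩
    rw [List.range_succ_eq_map, List.map_cons, List.map_map, List.append_assoc, List.singleton_append]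
    refine congrArg (part ++ ·) (congrArg₂ List.cons ?_ ?_)
    · rw [Nat.cast_zero, add_zero]
    · apply List.map_congr_left
      intro j _
      simp only [Function.comp_apply, Nat.succ_eq_add_one]
      congr 1
      push_cast
      ring

theorem pvAOuter_eq (core : Nat) (k : Nat) : ∀ (parts : List String) (cur : Int) (rem : Int),
    pvAOuter core parts cur rem k = parts ++ pvModel core k cur rem := by
  induction k with
  | zero => intro parts cur rem; simp [pvAOuter, pvModel]
  | succ k ih =>
    intro parts cur rem
    rw [pvAOuter]
    simp only [pvAInner_eq, List.nil_append]
    by_cases h : 0 < rem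
    · rw [if_pos (show rem > 0 from h), ih, pvModel, if_pos h,
        List.append_assoc, List.singleton_append]
      refine congrArg (parts ++ ·) (congrArg₂ List.cons ?_ rfl)
      unfold pvGrp
      congr 1
      rw [List.range_succ, List.map_append, List.map_singleton]
    · rw [if_neg (show ¬ rem > 0 from h), ih, pvModel, if_neg h,
        List.append_assoc, List.singleton_append]
      rfl

-- B's comprehension sizes list, peeled from the front
def pvSizesRec (base : Int) : Nat → Int → List Int
  | 0, _ => []
  | k + 1, rem => (base + if 0 < rem then 1 else 0) :: pvSizesRec base k (rem - if 0 < rem then 1 else 0)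

theorem pvSizes_eq (base : Int) (k : Nat) : ∀ (rem : Int),
    (List.range k).map (fun (i : Nat) => base + if (i : Int) < rem then 1 else 0) = pvSizesRec base k rem := by
  induction k with
  | zero => intro rem; simp [pvSizesRec]
  | succ m ih =>
    intro rem
    rw [List.range_succ_eq_map, pvSizesRec, List.map_cons, List.map_map]
    refine congrArg₂ List.cons (by norm_num) ?_
    rw [← ih (rem - if 0 < rem then 1 else 0)]
    apply List.map_congr_left
    intro j _
    simp only [Function.comp_apply, Nat.succ_eq_add_one]
    by_cases h : 0 < rem
    · simp only [h, if_true]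
      by_cases hj : (j : Int) < rem - 1
      · rw [if_pos (by push_cast; omega), if_pos hj]
      · rw [if_neg (by push_cast; omega), if_neg hj]
    · simp only [h, if_false, sub_zero]
      rw [if_neg (by push_cast; omega), if_neg (by omega)]

theorem pvSizesRec_sum_nonneg (base : Int) (hb : 0 ≤ base) (k : Nat) : ∀ rem, 0 ≤ (pvSizesRec base k rem).sum := by
  induction k with
  | zero => intro rem; simp [pvSizesRec]
  | succ m ih =>
    intro rem
    rw [pvSizesRec]
    simp only [List.sum_cons]
    have := ih (rem - if 0 < rem then 1 else 0)
    by_cases h : 0 < rem <;> simp [h] at * <;> omega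

-- slice of the flat number list = one group's numbers
theorem pvSlice_grp (start : Int) (t : Nat) (off s : Int)
    (hoff : 0 ≤ off) (hs : 0 ≤ s) (hle : off + s ≤ (t : Int)) :
    PySem.Str.join "," (PySem.List.slice
        ((List.range t).map (fun (j : Nat) => PySem.Int.toStr (start + (j : Int)))) (some off) (some (off + s)))
      = pvGrp (start + off) s.toNat := by
  rw [PySem.List.slice_toNat _ hoff (by omega)]
  unfold pvGrp
  congr 1
  apply List.ext_getElem
  · simp
    omega
  · intro i h1 h2
    simp only [List.getElem_take, List.getElem_drop, List.getElem_map, List.getElem_range]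
    congr 1
    push_cast
    omega

-- B's fold over the sizes list produces the model
theorem pvFoldB (start : Int) (base : Int) (hb : 0 ≤ base) (t : Nat) (k : Nat) :
    ∀ (acc : List String) (off rem : Int), 0 ≤ off → 0 ≤ rem →
    off + (pvSizesRec base k rem).sum ≤ (t : Int) →
    (pvSizesRec base k rem).foldl (fun (acc : List String × Int) size =>
        (acc.1 ++ [PySem.Str.join "," (PySem.List.slice
            ((List.range t).map (fun (j : Nat) => PySem.Int.toStr (start + (j : Int)))) (some acc.2) (some (acc.2 + size)))],
         acc.2 + size)) (acc, off)
      = (acc ++ pvModel base.toNat k (start + off) rem, off + (pvSizesRec base k rem).sum) := by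
  induction k with
  | zero => intro acc off rem _ _ _; simp [pvSizesRec, pvModel]
  | succ m ih =>
    intro acc off rem hoff hrem hsum
    rw [pvSizesRec] at hsum ⊢
    simp only [List.sum_cons] at hsum
    set s : Int := base + if 0 < rem then 1 else 0 with hs_def
    have hs : 0 ≤ s := by by_cases h : 0 < rem <;> simp [hs_def, h] <;> omega
    have hrest : 0 ≤ (pvSizesRec base m (rem - if 0 < rem then 1 else 0)).sum :=
      pvSizesRec_sum_nonneg base hb m _
    simp only [List.foldl_cons]
    rw [pvSlice_grp start t off s hoff hs (by omega)]
    rw [ih (acc ++ [pvGrp (start + off) s.toNat]) (off + s) (rem - if 0 < rem then 1 else 0)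
        (by omega) (by by_cases h : 0 < rem <;> simp [h] <;> omega) (by omega)]
    rw [Prod.mk.injEq]
    refine ⟨?_, by simp only [List.sum_cons]; ring⟩
    rw [List.append_assoc, List.singleton_append]
    refine congrArg (acc ++ ·) ?_
    rw [pvModel]
    by_cases h : 0 < rem
    · simp only [h, if_true]
      have h1 : s.toNat = base.toNat + 1 := by simp only [hs_def, h, if_true]; omega
      have h2 : start + (off + s) = start + off + ((base.toNat : Int)) + 1 := by
        simp only [hs_def, h, if_true]; omega
      rw [h1, h2]
    · simp only [h, if_false, sub_zero]
      have h1 : s.toNat = base.toNat := by simp only [hs_def, h, if_false]; omega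
      have h2 : start + (off + s) = start + off + ((base.toNat : Int)) := by
        simp only [hs_def, h, if_false]; omega
      rw [h1, h2]

-- A's result, in model form
theorem pvA_model (start end_ count : Int) :
    divide_numbers start end_ count =
      PySem.Str.join "|" (pvModel (PySem.Int.floordiv (end_ - start + 1) count).toNat
        count.toNat start (PySem.Int.mod (end_ - start + 1) count)) := by
  simp only [divide_numbers]
  rw [pvAOuter_eq]
  rw [List.nil_append]

-- B's result, in model form (count > 0)
theorem pvB_model (start end_ count : Int) (hpos : 0 < count) :
    divide_numbers_alt start end_ count =
      PySem.Str.join "|" (pvModel (max (PySem.Int.floordiv (end_ - start + 1) count) 0).toNat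
        count.toNat start (PySem.Int.mod (end_ - start + 1) count)) := by
  simp only [divide_numbers_alt]
  set base : Int := max (PySem.Int.floordiv (end_ - start + 1) count) 0 with hbase
  set rem : Int := PySem.Int.mod (end_ - start + 1) count with hrem
  have hbnn : 0 ≤ base := le_max_right _ _
  have hrem0 : 0 ≤ rem := PySem.Int.mod_nonneg _ hpos
  have hcr : PySem.List.pyRange 0 count 1 = (List.range count.toNat).map (fun (k : Nat) => (k : Int)) := by
    rw [PySem.List.pyRange_one]
    simp only [sub_zero, zero_add]
  have hsz : (List.range count.toNat).map
      ((fun i => base + if i < rem then 1 else 0) ∘ (fun (k : Nat) => (k : Int)))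
      = pvSizesRec base count.toNat rem := by
    rw [← pvSizes_eq]
    exact List.map_congr_left (fun _ _ => rfl)
  rw [hcr, List.map_map, hsz]
  set total : Int := (pvSizesRec base count.toNat rem).sum with htotal
  have htot0 : 0 ≤ total := pvSizesRec_sum_nonneg base hbnn _ _
  have hnums : PySem.List.pyRange 0 total 1 = (List.range total.toNat).map (fun (k : Nat) => (k : Int)) := by
    rw [PySem.List.pyRange_one]
    simp only [sub_zero, zero_add]
  have hmn : (List.range total.toNat).map
      ((fun j => PySem.Int.toStr (start + j)) ∘ (fun (k : Nat) => (k : Int)))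
      = (List.range total.toNat).map (fun (j : Nat) => PySem.Int.toStr (start + (j : Int))) :=
    List.map_congr_left (fun _ _ => rfl)
  rw [hnums, List.map_map, hmn]
  rw [pvFoldB start base hbnn total.toNat count.toNat [] 0 rem le_rfl hrem0 (by omega)]
  rw [List.nil_append, add_zero]

-- count < 0: both sides produce the empty join
theorem pvNeg_case (start end_ count : Int) (h : count < 0) :
    divide_numbers start end_ count = divide_numbers_alt start end_ count := by
  simp only [divide_numbers, divide_numbers_alt]
  have h1 : count.toNat = 0 := by omega
  have h2 : PySem.List.pyRange 0 count 1 = [] := PySem.List.pyRange_one_eq_nil (by omega)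
  rw [h1, h2]
  simp [pvAOuter]

-- ===== VERDICT (by name: the statement is the Claim_ definition above) =====
theorem divide_numbers_spec : Claim_equal_divide_numbers := by
  intro start end_ count _ hpre
  unfold Spec_divide_numbers
  rcases lt_trichotomy count 0 with hneg | hzero | hpos
  · exact pvNeg_case start end_ count hneg
  · exact absurd hzero hpre
  · rw [pvA_model, pvB_model start end_ count hpos]
    congr 2
    omega
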